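-- pv_equiv track=rewrite | github.com/Pharallah/Pineapple-Express-Checkout | server/operations.py | custom_titled
-- ===== SOURCE A (Python) =====
-- def custom_titled(text):
--     # Define punctuation characters
--     punctuation = ".,!?;"
--     titled_words = []
--     word = ''
--
--     for char in text:
--         if char.isalnum() or (char == "'" and word):
--             # Build the current word
--             word += char
--         else:
--             # Process the word if we hit punctuation or space
--             if word:
--                 # Capitalize first letter and lower the rest (handles possessive 's naturally)
--                 titled_word = word[0].upper() + word[1:].lower()
--                 titled_words.append(titled_word)
--                 word = ''
--
--             # Add punctuation or space as a separate element
--             if char.isspace():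
--                 titled_words.append(char)
--
--     # Process any remaining word after the loop ends
--     if word:
--         titled_word = word[0].upper() + word[1:].lower()
--         titled_words.append(titled_word)
--
--     # Join the list into a string
--     result = ''.join(titled_words)
--
--     # Remove any trailing punctuation from the result
--     if result and result[-1] in punctuation:
--         result = result.rstrip(punctuation)
--
--     return result
-- ===== SOURCE B (Python) =====
-- def custom_titled(text):
--     # Different decomposition: split text into maximal runs of word chars
--     # (alnum or apostrophe) vs non-word chars, then map each run at once.
--     def key(c):
--         return c.isalnum() or c == "'"
--     pieces = []
--     i, n = 0, len(text)
--     while i < n: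
--         j = i
--         k = key(text[i])
--         while j < n and key(text[j]) == k:
--             j += 1
--         run = text[i:j]
--         if k:
--             w = run.lstrip("'")
--             if w:
--                 pieces.append(w[0].upper() + w[1:].lower())
--         else:
--             pieces.append(''.join(c for c in run if c.isspace()))
--         i = j
--     result = ''.join(pieces)
--     if result and result[-1] in ".,!?;":
--         result = result.rstrip(".,!?;")
--     return result
-- ===== Notes on version B (the rewrite author's own statement) =====
-- stated objective: alternative
-- what changed: Replaces A's char-by-char state machine carrying a partial-word accumulator with a run-splitting scan: the text is cut into maximal runs of word chars (alnum/apostrophe) vs non-word chars and each run is mapped wholesale (lstrip apostrophes + capitalize, or keep only whitespace).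
import Mathlib
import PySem

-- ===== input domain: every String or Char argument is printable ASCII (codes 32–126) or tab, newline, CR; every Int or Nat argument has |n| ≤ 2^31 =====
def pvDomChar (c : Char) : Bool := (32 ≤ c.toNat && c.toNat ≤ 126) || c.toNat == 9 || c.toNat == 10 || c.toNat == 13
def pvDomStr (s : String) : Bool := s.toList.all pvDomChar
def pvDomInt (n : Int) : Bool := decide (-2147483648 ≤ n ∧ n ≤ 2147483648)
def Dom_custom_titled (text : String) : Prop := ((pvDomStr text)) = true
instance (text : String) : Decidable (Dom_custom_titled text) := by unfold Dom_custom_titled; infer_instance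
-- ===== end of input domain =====

-- B replaces A's char-by-char word accumulator with a run-splitting scan over maximal
-- word / non-word runs (objective: alternative decomposition, same asymptotic cost).

-- word[0].upper() + word[1:].lower()  (shared by both Pythons)
def titlePiece (w : List Char) : List Char :=
  match w with
  | [] => []
  | c :: cs => PySem.Chars.upperChar c :: PySem.Chars.lower cs

def pvPunct : List Char := ['.', ',', '!', '?', ';']

-- exact port of str.rstrip(".,!?;"): drop trailing chars in the set
def rstripPunct (cs : List Char) : List Char :=
  (cs.reverse.dropWhile (fun c => pvPunct.contains c)).reverse

-- trailing-punctuation guard (identical in both Pythons)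
def trailGuard (cs : List Char) : List Char :=
  match cs.getLast? with
  | some c => if pvPunct.contains c then rstripPunct cs else cs
  | none => cs

-- ===== PORT A =====
-- A's loop: state = (titled_words, word), char by char
def goA : List Char → List (List Char) → List Char → List (List Char)
  | [], tw, w => tw ++ (if w.isEmpty then [] else [titlePiece w])
  | c :: rest, tw, w =>
    if PySem.Chars.isalnum c || (c == '\'' && !w.isEmpty) then
      goA rest tw (w ++ [c])
    else
      goA rest (tw ++ (if w.isEmpty then [] else [titlePiece w])
                   ++ (if PySem.Chars.isspace c then [[c]] else [])) []

def custom_titled (text : String) : String :=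
  String.mk (trailGuard (goA text.toList [] []).flatten)

-- ===== PORT B =====
def keyC (c : Char) : Bool := PySem.Chars.isalnum c || c == '\''

-- B's scan: take a maximal run of same-key chars, map the whole run at once
def goB : List Char → List Char
  | [] => []
  | c :: rest =>
    if keyC c then
      (match (c :: rest.takeWhile keyC).dropWhile (· == '\'') with
        | [] => []
        | d :: ds => PySem.Chars.upperChar d :: PySem.Chars.lower ds)
        ++ goB (rest.dropWhile keyC)
    else
      (c :: rest.takeWhile (fun d => ! keyC d)).filter PySem.Chars.isspace
        ++ goB (rest.dropWhile (fun d => ! keyC d))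
  termination_by cs => cs.length
  decreasing_by
  · exact Nat.lt_succ_of_le (rest.length_dropWhile_le keyC)
  · exact Nat.lt_succ_of_le (rest.length_dropWhile_le _)

def custom_titled_alt (text : String) : String :=
  String.mk (trailGuard (goB text.toList))

-- ===== PRECONDITION & SPEC =====
def Spec_custom_titled (text : String) (out : String) : Prop := out = custom_titled_alt text
instance (text : String) (out : String) : Decidable (Spec_custom_titled text out) := by unfold Spec_custom_titled; infer_instance

-- ===== CLAIM (what is proved, stated in full; the proofs are below) =====
def Claim_equal_custom_titled : Prop := ∀ (text : String), Dom_custom_titled text → Spec_custom_titled text (custom_titled text)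

-- ===== LEMMAS AND PROOFS =====

lemma goA_nil (tw : List (List Char)) (w : List Char) :
    goA [] tw w = tw ++ (if w.isEmpty then [] else [titlePiece w]) := rfl

lemma goA_cons (c : Char) (rest : List Char) (tw : List (List Char)) (w : List Char) :
    goA (c :: rest) tw w =
      if PySem.Chars.isalnum c || (c == '\'' && !w.isEmpty) then
        goA rest tw (w ++ [c])
      else
        goA rest (tw ++ (if w.isEmpty then [] else [titlePiece w])
                     ++ (if PySem.Chars.isspace c then [[c]] else [])) [] := rfl

lemma goB_nil : goB [] = [] := by rw [goB]

lemma goB_cons (c : Char) (rest : List Char) :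
    goB (c :: rest) =
      if keyC c then
        (match (c :: rest.takeWhile keyC).dropWhile (· == '\'') with
          | [] => []
          | d :: ds => PySem.Chars.upperChar d :: PySem.Chars.lower ds)
          ++ goB (rest.dropWhile keyC)
      else
        (c :: rest.takeWhile (fun d => ! keyC d)).filter PySem.Chars.isspace
          ++ goB (rest.dropWhile (fun d => ! keyC d)) := by rw [goB]

lemma goA_acc (cs : List Char) : ∀ tw w, goA cs tw w = tw ++ goA cs [] w := by
  induction cs with
  | nil => intro tw w; rw [goA_nil, goA_nil]; simp
  | cons c rest ih =>
    intro tw w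
    rw [goA_cons, goA_cons]
    by_cases h : (PySem.Chars.isalnum c || (c == '\'' && !w.isEmpty)) = true
    · rw [if_pos h, if_pos h, ih tw, ih []]
      try simp
    · rw [if_neg h, if_neg h,
        ih (tw ++ (if w.isEmpty then [] else [titlePiece w]) ++ _),
        ih ([] ++ (if w.isEmpty then [] else [titlePiece w]) ++ _)]
      try simp [List.append_assoc]

lemma goB_nonkey_seg (cs : List Char) :
    (cs.takeWhile (fun d => ! keyC d)).filter PySem.Chars.isspace
      ++ goB (cs.dropWhile (fun d => ! keyC d)) = goB cs := by
  cases cs with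
  | nil => simp [goB_nil]
  | cons c rest =>
    by_cases h : keyC c = true
    · simp [List.takeWhile_cons, List.dropWhile_cons, h]
    · rw [goB_cons, if_neg h]
      simp [List.takeWhile_cons, List.dropWhile_cons, h]

lemma goB_apos (rest : List Char) : goB ('\'' :: rest) = goB rest := by
  have hk : keyC '\'' = true := by decide
  cases rest with
  | nil => rw [goB_cons, if_pos hk]; simp [goB_nil]
  | cons d rest' =>
    by_cases h : keyC d = true
    · rw [goB_cons, if_pos hk, goB_cons, if_pos h]
      simp [List.takeWhile_cons, List.dropWhile_cons, h, List.dropWhile_cons]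
    · rw [goB_cons, if_pos hk]
      simp [List.takeWhile_cons, List.dropWhile_cons, h]

lemma isalnum_ne_apos {c : Char} (h : PySem.Chars.isalnum c = true) : (c == '\'') = false := by
  cases hc : (c == '\'') with
  | false => rfl
  | true =>
    have : c = '\'' := beq_iff_eq.mp hc
    subst this
    exact absurd h (by decide)

lemma main_both : ∀ n (cs : List Char), cs.length ≤ n →
    ((goA cs [] []).flatten = goB cs ∧
      ∀ w, w ≠ [] → (goA cs [] w).flatten =
        titlePiece (w ++ cs.takeWhile keyC) ++ goB (cs.dropWhile keyC)) := by
  intro n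
  induction n with
  | zero =>
    intro cs hcs
    have : cs = [] := List.eq_nil_of_length_eq_zero (Nat.le_zero.mp hcs)
    subst this
    refine ⟨by simp [goA_nil, goB_nil], ?_⟩
    intro w hw
    rw [goA_nil]
    simp [List.isEmpty_iff, hw, goB_nil]
  | succ n ih =>
    intro cs hcs
    cases cs with
    | nil =>
      refine ⟨by simp [goA_nil, goB_nil], ?_⟩
      intro w hw
      rw [goA_nil]
      simp [List.isEmpty_iff, hw, goB_nil]
    | cons c rest =>
      have hr : rest.length ≤ n := Nat.le_of_succ_le_succ hcs
      obtain ⟨ihT, ihL⟩ := ih rest hr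
      constructor
      · -- T: (goA (c::rest) [] []).flatten = goB (c::rest)
        by_cases ha : PySem.Chars.isalnum c = true
        · have hk : keyC c = true := by simp [keyC, ha]
          have hcond : (PySem.Chars.isalnum c || (c == '\'' && !(([] : List Char)).isEmpty)) = true := by
            simp [ha]
          rw [goA_cons, if_pos hcond]
          simp only [List.nil_append]
          rw [ihL [c] (by simp), goB_cons, if_pos hk]
          have hne : (c == '\'') = false := isalnum_ne_apos ha
          simp [List.dropWhile_cons, hne, titlePiece, List.takeWhile_cons]
        · by_cases hk : keyC c = true
          · -- c = '\''
            have hc : c = '\'' := by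
              simp [keyC, ha] at hk
              exact hk
            subst hc
            have hcond : ¬ (PySem.Chars.isalnum '\'' || ('\'' == '\'' && !(([] : List Char)).isEmpty)) = true := by decide
            rw [goA_cons, if_neg hcond, goB_apos]
            have hsp : PySem.Chars.isspace '\'' = false := by decide
            simp only [hsp, List.isEmpty_nil, if_pos rfl, if_neg Bool.false_ne_true,
              List.append_nil, List.nil_append]
            exact ihT
          · -- non-key char
            have hkb : keyC c = false := by simpa using hk
            have hab : PySem.Chars.isalnum c = false := by simpa using ha
            have hap : (c == '\'') = false := by
              simp [keyC, hab] at hkb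
              simpa using hkb
            have hcond : (PySem.Chars.isalnum c || (c == '\'' && !(([] : List Char)).isEmpty)) = false := by
              simp [hab, hap]
            rw [goA_cons, if_neg (by simp [hab, hap]), goA_acc]
            rw [← goB_nonkey_seg (c :: rest)]
            have hnk : (!keyC c) = true := by simp [hkb]
            by_cases hs : PySem.Chars.isspace c = true
            · simp [hs, List.takeWhile_cons, List.dropWhile_cons, hnk, hkb, ihT,
                goB_nonkey_seg rest]
            · simp [hs, List.takeWhile_cons, List.dropWhile_cons, hnk, hkb, ihT,
                goB_nonkey_seg rest]
      · -- L
        intro w hw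
        by_cases hk : keyC c = true
        · have hcond : (PySem.Chars.isalnum c || (c == '\'' && !w.isEmpty)) = true := by
            have hk' : PySem.Chars.isalnum c = true ∨ (c == '\'') = true := by
              simpa [keyC] using hk
            rcases hk' with h | h
            · simp [h]
            · simp [h, List.isEmpty_iff, hw]
          rw [goA_cons, if_pos hcond, ihL (w ++ [c]) (by simp)]
          rcases hw' : w with _ | ⟨a, as⟩
          · exact absurd hw' hw
          · simp [List.takeWhile_cons, List.dropWhile_cons, hk, titlePiece]
        · have hkb : keyC c = false := by simpa using hk
          have hab : PySem.Chars.isalnum c = false := by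
            simp [keyC] at hkb
            simpa using hkb.1
          have hap : (c == '\'') = false := by
            simp [keyC] at hkb
            simpa using hkb.2
          have hcond : (PySem.Chars.isalnum c || (c == '\'' && !w.isEmpty)) = false := by
            simp [hab, hap]
          rw [goA_cons, if_neg (by simp [hab, hap]), goA_acc]
          rw [List.takeWhile_cons, List.dropWhile_cons]
          simp only [hkb, if_neg Bool.false_ne_true]
          rw [← goB_nonkey_seg (c :: rest)]
          have hnk : (!keyC c) = true := by simp [hkb]
          by_cases hs : PySem.Chars.isspace c = true
          · simp [hs, List.takeWhile_cons, List.dropWhile_cons, hnk, hkb, ihT,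
              List.isEmpty_iff, hw, goB_nonkey_seg rest]
          · simp [hs, List.takeWhile_cons, List.dropWhile_cons, hnk, hkb, ihT,
              List.isEmpty_iff, hw, goB_nonkey_seg rest]

-- ===== VERDICT (by name: the statement is the Claim_ definition above) =====
theorem custom_titled_spec : Claim_equal_custom_titled := by
  intro text _
  unfold Spec_custom_titled custom_titled custom_titled_alt
  rw [(main_both text.toList.length text.toList le_rfl).1]
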